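-- pv_equiv track=rewrite | github.com/EDA2021-1-SEC05-G-02/R2_G2_202110. | App/model.py | segundo_requerimiento
-- ===== SOURCE A (Python) =====
-- def segundo_requerimiento(catalog,country):
--     paises=[]
--     for i in catalog:
--         for k,v in i.items():
--             if k=="country" and v in country:
--                 paises.append(i)
--     nombres=[]
--     dates=[]
--     for i in paises:
--         for k,v in i.items():
--             if k=="title":
--                 nombres.append(v)
--             if k=="trending_date":
--                 dates.append(v)
--     dicts = {key: [] for key in nombres}
--     for k, v in zip(nombres, dates):
--         dicts[k].append(v)
--     unicas_fechas=[]
--     for key,value in dicts.items():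
--           unicas_fechas.append(set(value))
--     duracion=[]
--     for i in unicas_fechas:
--         duracion.append(len(i))
--     maximo=max(duracion)
--     indice_mayor=duracion.index(maximo)
--     return (paises[indice_mayor], maximo)
-- ===== SOURCE B (Python) =====
-- def segundo_requerimiento(catalog, country):
--     # one fused pass; then a flat seen-set of (title,date) pairs feeding a counter;
--     # then a single running-argmax scan (no dict of per-title lists/sets, no max()+.index()).
--     paises, nombres, dates = [], [], []
--     for i in catalog:
--         if i.get("country") in country:
--             paises.append(i)
--             if "title" in i:
--                 nombres.append(i["title"])
--             if "trending_date" in i: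
--                 dates.append(i["trending_date"])
--     cnt = dict.fromkeys(nombres, 0)
--     seen = set()
--     for p in zip(nombres, dates):
--         if p not in seen:
--             seen.add(p)
--             cnt[p[0]] += 1
--     best_i, best_c = 0, -1
--     for i2, c in enumerate(cnt.values()):
--         if c > best_c:
--             best_i, best_c = i2, c
--     return (paises[best_i], best_c)
-- ===== Notes on version B (the rewrite author's own statement) =====
-- stated objective: alternative
-- what changed: B never groups dates per title: a single fused pass filters rows and collects titles/dates together, distinct-date counts come from one flat seen-set of (title,date) pairs driving a counter dict, and the winner is picked by a running argmax scan, replacing A's staged pipeline of items()-scan filter, dict-of-lists grouping, per-key set conversion, length list, max() and .index().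
import Mathlib
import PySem

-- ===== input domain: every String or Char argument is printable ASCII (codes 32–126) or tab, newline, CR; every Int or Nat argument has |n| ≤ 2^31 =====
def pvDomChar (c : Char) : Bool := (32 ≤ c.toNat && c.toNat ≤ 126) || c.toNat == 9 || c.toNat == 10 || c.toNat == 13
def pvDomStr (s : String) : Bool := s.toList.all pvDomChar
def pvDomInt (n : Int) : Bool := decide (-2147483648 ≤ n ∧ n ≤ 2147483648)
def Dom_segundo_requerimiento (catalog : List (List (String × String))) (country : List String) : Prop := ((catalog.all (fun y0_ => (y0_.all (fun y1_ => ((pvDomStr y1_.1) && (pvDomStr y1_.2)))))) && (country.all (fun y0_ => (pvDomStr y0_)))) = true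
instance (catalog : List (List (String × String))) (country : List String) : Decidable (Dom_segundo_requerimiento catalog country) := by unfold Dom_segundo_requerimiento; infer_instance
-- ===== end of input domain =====

-- B replaces A's staged pipeline (items()-scan filter, dict-of-lists grouping, per-key set
-- conversion, length list, max() and .index()) by one fused filtering pass, a flat seen-set of
-- (title, date) pairs driving a counter dict, and a running-argmax scan; same return value.

-- ===== PORT A =====
-- Each catalog row is a Python dict; `pvItemsA i` is the items list of the dict the association list denotes.
def pvItemsA (i : List (String × String)) : List (String × String) :=
  (PySem.Dict.ofList i).items

def segundo_requerimiento (catalog : List (List (String × String))) (country : List String) :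
    (List (String × String)) × Int :=
  let paises : List (List (String × String)) :=
    catalog.foldl (fun acc i =>
      (pvItemsA i).foldl (fun acc2 kv =>
        if kv.1 == "country" && country.contains kv.2 then acc2 ++ [pvItemsA i] else acc2) acc) []
  let nd : List String × List String :=
    paises.foldl (fun st i =>
      i.foldl (fun st kv =>
        let st1 := if kv.1 == "title" then (st.1 ++ [kv.2], st.2) else st
        if kv.1 == "trending_date" then (st1.1, st1.2 ++ [kv.2]) else st1) st) ([], [])
  let nombres := nd.1
  let dates := nd.2
  let dicts0 : PySem.Dict String (List String) :=
    nombres.foldl (fun d key => d.insert key []) PySem.Dict.empty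
  let dicts := (nombres.zip dates).foldl (fun d kv => d.modify kv.1 [] (fun l => l ++ [kv.2])) dicts0
  let unicas_fechas : List (PySem.Set String) :=
    dicts.items.foldl (fun a kv => a ++ [PySem.Set.ofList kv.2]) []
  let duracion : List Int :=
    unicas_fechas.foldl (fun a s => a ++ [PySem.Set.len s]) []
  match PySem.List.max? duracion (fun x => x) with
  | none => ([], 0)  -- Python: max([]) raises ValueError here; excluded by Pre_
  | some maximo => (paises.getD ((PySem.List.index? duracion maximo).getD 0) [], maximo)

-- ===== PORT B =====
def segundo_requerimiento_alt (catalog : List (List (String × String))) (country : List String) :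
    (List (String × String)) × Int :=
  -- one fused pass building paises, nombres, dates together
  let st := catalog.foldl
    (fun (st : List (List (String × String)) × List String × List String) i =>
      let d := PySem.Dict.ofList i
      if (match d.get? "country" with | some v => country.contains v | none => false) then
        (st.1 ++ [d.items],
         (match d.get? "title" with | some t => st.2.1 ++ [t] | none => st.2.1),
         (match d.get? "trending_date" with | some dt => st.2.2 ++ [dt] | none => st.2.2))
      else st)
    ([], [], [])
  let paises := st.1
  let nombres := st.2.1
  let dates := st.2.2
  -- cnt = dict.fromkeys(nombres, 0)
  let cnt0 : PySem.Dict String Int := nombres.foldl (fun d t => d.insert t 0) PySem.Dict.empty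
  -- flat seen-set of (title, date) pairs driving the counter
  let sc := (nombres.zip dates).foldl
    (fun (sc : PySem.Set (String × String) × PySem.Dict String Int) p =>
      if PySem.Set.contains sc.1 p then sc
      else (PySem.Set.add sc.1 p, sc.2.modify p.1 0 (fun c => c + 1)))
    (PySem.Set.empty, cnt0)
  -- running argmax over cnt.values()
  let sel := (sc.2.values).foldl
    (fun (acc : Nat × Int × Nat) c =>
      if acc.2.1 < c then (acc.2.2, c, acc.2.2 + 1) else (acc.1, acc.2.1, acc.2.2 + 1))
    (0, -1, 0)
  (paises.getD sel.1 [], sel.2.1)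

-- ===== PRECONDITION & SPEC =====
-- Pre_ excludes exactly the inputs where Python A raises (max of an empty list: no catalog row both
-- matches a requested country and carries a "title" key); Python B raises or returns a -1 sentinel there.
def Pre_segundo_requerimiento (catalog : List (List (String × String))) (country : List String) : Prop :=
  ∃ i ∈ catalog, (∃ c ∈ country, (PySem.Dict.ofList i).get? "country" = some c) ∧
    ((PySem.Dict.ofList i).get? "title").isSome = true
instance (catalog : List (List (String × String))) (country : List String) : Decidable (Pre_segundo_requerimiento catalog country) := by unfold Pre_segundo_requerimiento; infer_instance

def pvWitness_segundo_requerimiento : (List (List (String × String))) × List String :=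
  ([[("country", "CO"), ("title", "t1"), ("trending_date", "d1")]], ["CO"])

def Spec_segundo_requerimiento (catalog : List (List (String × String))) (country : List String) (out : (List (String × String)) × Int) : Prop := out = segundo_requerimiento_alt catalog country
instance (catalog : List (List (String × String))) (country : List String) (out : (List (String × String)) × Int) : Decidable (Spec_segundo_requerimiento catalog country out) := by unfold Spec_segundo_requerimiento; infer_instance

-- ===== CLAIM (what is proved, stated in full; the proofs are below) =====
def Claim_equal_segundo_requerimiento : Prop := ∀ (catalog : List (List (String × String))) (country : List String), Dom_segundo_requerimiento catalog country → Pre_segundo_requerimiento catalog country → Spec_segundo_requerimiento catalog country (segundo_requerimiento catalog country)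

-- ===== LEMMAS AND PROOFS =====

-- the country test A's inner loop performs, phrased as one lookup on the items list
def pvCond (country : List String) (l : List (String × String)) : Bool :=
  match l.find? (fun kv => kv.1 == "country") with
  | some kv => country.contains kv.2
  | none => false

-- the optional value at key k0, as a 0/1-element list
def pvOpt (k0 : String) (l : List (String × String)) : List String :=
  ((l.find? (fun kv => kv.1 == k0)).map Prod.snd).toList

-- shared normal form of the two programs' data
def pvF (catalog : List (List (String × String))) (country : List String) :
    List (List (String × String)) :=
  catalog.filter (fun i => pvCond country (pvItemsA i))

def pvN (catalog : List (List (String × String))) (country : List String) : List String :=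
  (pvF catalog country).flatMap (fun i => pvOpt "title" (pvItemsA i))

def pvD (catalog : List (List (String × String))) (country : List String) : List String :=
  (pvF catalog country).flatMap (fun i => pvOpt "trending_date" (pvItemsA i))

def pvPairs (catalog : List (List (String × String))) (country : List String) :
    List (String × String) :=
  (pvN catalog country).zip (pvD catalog country)

def pvVals (catalog : List (List (String × String))) (country : List String) (t : String) :
    List String :=
  ((pvPairs catalog country).filter (fun p => p.1 == t)).map Prod.snd

def pvDur (catalog : List (List (String × String))) (country : List String) : List Int :=
  (PySem.Set.ofList (pvN catalog country)).map
    (fun t => PySem.Set.len (PySem.Set.ofList (pvVals catalog country t)))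

def pvPaises (catalog : List (List (String × String))) (country : List String) :
    List (List (String × String)) :=
  (pvF catalog country).map pvItemsA

def scanF (acc : Nat × Int × Nat) (c : Int) : Nat × Int × Nat :=
  if acc.2.1 < c then (acc.2.2, c, acc.2.2 + 1) else (acc.1, acc.2.1, acc.2.2 + 1)

lemma pvItemsA_nodup (i : List (String × String)) : ((pvItemsA i).map Prod.fst).Nodup := by
  have h := PySem.Dict.nodup_keys_ofList (κ := String) (ν := String) i
  simpa [PySem.Dict.keys, pvItemsA] using h

lemma foldl_country (country : List String) (l : List (String × String))
    (hnd : (l.map Prod.fst).Nodup) (acc : List (List (String × String)))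
    (x : List (String × String)) :
    l.foldl (fun acc2 kv =>
        if kv.1 == "country" && country.contains kv.2 then acc2 ++ [x] else acc2) acc
      = if pvCond country l then acc ++ [x] else acc := by
  induction l generalizing acc with
  | nil => simp [pvCond]
  | cons kv t ih =>
    simp only [List.map_cons, List.nodup_cons] at hnd
    by_cases hk : kv.1 = "country"
    · have htail : t.find? (fun kv => kv.1 == "country") = none := by
        rw [List.find?_eq_none]
        intro y hy hby
        exact hnd.1 (by
          have : y.1 = "country" := by simpa using hby
          rw [hk, ← this]; exact List.mem_map_of_mem hy)
      rw [List.foldl_cons, ih hnd.2]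
      simp [pvCond, hk, htail]
    · rw [List.foldl_cons, ih hnd.2]
      have hbk : (kv.1 == "country") = false := by simpa using hk
      simp [pvCond, hbk]

lemma foldl_country_items (country : List String) (i : List (String × String))
    (acc : List (List (String × String))) (x : List (String × String)) :
    (pvItemsA i).foldl (fun acc2 kv =>
        if kv.1 == "country" && country.contains kv.2 then acc2 ++ [x] else acc2) acc
      = if pvCond country (pvItemsA i) then acc ++ [x] else acc :=
  foldl_country country _ (pvItemsA_nodup i) acc x

lemma foldl_td (l : List (String × String)) (hnd : (l.map Prod.fst).Nodup)
    (st : List String × List String) :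
    l.foldl (fun st kv =>
        let st1 := if kv.1 == "title" then (st.1 ++ [kv.2], st.2) else st
        if kv.1 == "trending_date" then (st1.1, st1.2 ++ [kv.2]) else st1) st
      = (st.1 ++ pvOpt "title" l, st.2 ++ pvOpt "trending_date" l) := by
  induction l generalizing st with
  | nil => simp [pvOpt]
  | cons kv t ih =>
    simp only [List.map_cons, List.nodup_cons] at hnd
    have tail_none : ∀ k0 : String, kv.1 = k0 →
        t.find? (fun kv => kv.1 == k0) = none := by
      intro k0 hk
      rw [List.find?_eq_none]
      intro y hy hby
      exact hnd.1 (by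
        have : y.1 = k0 := by simpa using hby
        rw [hk, ← this]; exact List.mem_map_of_mem hy)
    by_cases h1 : kv.1 = "title"
    · have h2 : kv.1 ≠ "trending_date" := by rw [h1]; decide
      have hb1 : (kv.1 == "title") = true := by simpa using h1
      have hb2 : (kv.1 == "trending_date") = false := by simpa using h2
      rw [List.foldl_cons, ih hnd.2]
      simp [pvOpt, hb1, hb2, tail_none _ h1]
    · by_cases h2 : kv.1 = "trending_date"
      · have hb1 : (kv.1 == "title") = false := by simpa using h1
        have hb2 : (kv.1 == "trending_date") = true := by simpa using h2
        rw [List.foldl_cons, ih hnd.2]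
        simp [pvOpt, hb1, hb2, tail_none _ h2]
      · have hb1 : (kv.1 == "title") = false := by simpa using h1
        have hb2 : (kv.1 == "trending_date") = false := by simpa using h2
        rw [List.foldl_cons, ih hnd.2]
        simp [pvOpt, hb1, hb2]

lemma foldl_td_items (i : List (String × String)) (st : List String × List String) :
    (pvItemsA i).foldl (fun st kv =>
        let st1 := if kv.1 == "title" then (st.1 ++ [kv.2], st.2) else st
        if kv.1 == "trending_date" then (st1.1, st1.2 ++ [kv.2]) else st1) st
      = (st.1 ++ pvOpt "title" (pvItemsA i), st.2 ++ pvOpt "trending_date" (pvItemsA i)) :=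
  foldl_td _ (pvItemsA_nodup i) st

lemma foldl_pair {α : Type} (f g : α → List String) (l : List α)
    (st : List String × List String) :
    l.foldl (fun st i => (st.1 ++ f i, st.2 ++ g i)) st
      = (st.1 ++ l.flatMap f, st.2 ++ l.flatMap g) := by
  induction l generalizing st with
  | nil => simp
  | cons x t ih => simp [ih]

lemma get?_eq_find? {ν : Type} (d : PySem.Dict String ν) (k : String) :
    d.get? k = (d.items.find? (fun kv => kv.1 == k)).map Prod.snd := rfl

lemma pvOpt_get? (k0 : String) (i : List (String × String)) :
    pvOpt k0 (pvItemsA i) = ((PySem.Dict.ofList i).get? k0).toList := rfl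

-- a dict whose key list has no duplicates is its key list paired with its lookups
lemma items_eq_map_keys {ν : Type} (d : PySem.Dict String ν) (d0 : ν) (h : d.keys.Nodup) :
    d.items = d.keys.map (fun k => (k, d.getD k d0)) := by
  have hk : d.keys = d.items.map Prod.fst := rfl
  rw [hk, List.map_map]
  have hpt : ∀ p ∈ d.items, ((fun k => (k, d.getD k d0)) ∘ Prod.fst) p = p := by
    intro p hp
    have hm : (p.1, p.2) ∈ d.items := by simpa using hp
    have := PySem.Dict.getD_of_mem_items d hm h d0
    simp [Function.comp, this]
  have h2 := List.map_congr_left hpt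
  simp only [List.map_id_fun'] at h2
  exact h2.symm

lemma set_update_absorb {α : Type} [BEq α] [LawfulBEq α] (s : PySem.Set α) (xs : List α)
    (h : ∀ x ∈ xs, x ∈ s) : PySem.Set.update s xs = s := by
  rw [PySem.Set.update_eq_append_filter]
  have hnil : (PySem.Set.ofList xs).filter (fun y => !s.contains y) = [] := by
    rw [List.filter_eq_nil_iff]
    intro y hy
    have hys : y ∈ s := h y ((PySem.Set.mem_ofList xs y).1 hy)
    simp [hys]
  rw [hnil, List.append_nil]

lemma getD_foldl_insert_const {ν : Type} (l : List String) (c : ν) (d : PySem.Dict String ν)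
    (t : String) (h : d.getD t c = c) :
    (l.foldl (fun d k => d.insert k c) d).getD t c = c := by
  induction l generalizing d with
  | nil => exact h
  | cons x xs ih =>
    rw [List.foldl_cons]
    exact ih _ (by rw [PySem.Dict.getD_insert]; split_ifs <;> simp [h])

lemma mem_pairs_fst (catalog : List (List (String × String))) (country : List String)
    {p : String × String} (hp : p ∈ pvPairs catalog country) : p.1 ∈ pvN catalog country :=
  (List.of_mem_zip hp).1

-- ---- A-side normalization ----

lemma A_norm (catalog : List (List (String × String))) (country : List String) :
    segundo_requerimiento catalog country =
      match PySem.List.max? (pvDur catalog country) (fun x => x) with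
      | none => ([], 0)
      | some m =>
          ((pvPaises catalog country).getD
            ((PySem.List.index? (pvDur catalog country) m).getD 0) [], m) := by
  simp only [segundo_requerimiento]
  simp only [foldl_country_items]
  rw [PySem.List.foldl_append_if (fun i => pvCond country (pvItemsA i)) pvItemsA catalog []]
  simp only [List.nil_append, List.foldl_map, foldl_td_items]
  rw [foldl_pair]
  simp only [List.nil_append]
  have hpaises : List.map pvItemsA (List.filter (fun i => pvCond country (pvItemsA i)) catalog)
      = pvPaises catalog country := rfl
  have hN : List.flatMap (fun i => pvOpt "title" (pvItemsA i))
      (List.filter (fun i => pvCond country (pvItemsA i)) catalog) = pvN catalog country := rfl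
  have hD : List.flatMap (fun i => pvOpt "trending_date" (pvItemsA i))
      (List.filter (fun i => pvCond country (pvItemsA i)) catalog) = pvD catalog country := rfl
  rw [hpaises, hN, hD,
    show (pvN catalog country).zip (pvD catalog country) = pvPairs catalog country from rfl]
  -- characterize the dict of lists
  set d0 : PySem.Dict String (List String) :=
    (pvN catalog country).foldl (fun d key => d.insert key []) PySem.Dict.empty with hd0
  set dd := (pvPairs catalog country).foldl
    (fun d kv => d.modify kv.1 [] (fun l => l ++ [kv.2])) d0 with hdd
  have hkeys0 : d0.keys = PySem.Set.ofList (pvN catalog country) := by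
    rw [hd0, PySem.Dict.keys_foldl_insert (f := fun _ _ => ([] : List String))]
    exact PySem.Set.update_empty _
  have hnd0 : d0.keys.Nodup := by
    rw [hd0]
    exact PySem.Dict.nodup_keys_foldl_insert _ _ _ (by simp)
  have hkeys : dd.keys = PySem.Set.ofList (pvN catalog country) := by
    rw [hdd, PySem.Dict.keys_foldl_modify_key (pvPairs catalog country) Prod.fst []
      (fun _ kv v => v ++ [kv.2]) d0, hkeys0, set_update_absorb]
    intro x hx
    obtain ⟨p, hp, rfl⟩ := List.mem_map.1 hx
    exact (PySem.Set.mem_ofList _ _).2 (mem_pairs_fst catalog country hp)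
  have hnd : dd.keys.Nodup := by
    rw [hdd]
    exact PySem.Dict.nodup_keys_foldl_modify_key _ Prod.fst [] _ d0 hnd0
  have hgetD : ∀ t, dd.getD t [] = pvVals catalog country t := by
    intro t
    rw [hdd, PySem.Dict.getD_foldl_modify_append, getD_foldl_insert_const _ _ _ _
      (by simp [PySem.Dict.getD_empty])]
    simp [pvVals]
  have hitems : dd.items
      = (PySem.Set.ofList (pvN catalog country)).map (fun t => (t, pvVals catalog country t)) := by
    rw [items_eq_map_keys dd ([] : List String) hnd, hkeys]
    exact List.map_congr_left (fun t _ => by rw [hgetD])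
  simp only [PySem.List.foldl_append_singleton_eq_map, List.nil_append, List.map_map]
  have hdur : List.map (PySem.Set.len ∘ fun x : String × List String => PySem.Set.ofList x.2)
      dd.items = pvDur catalog country := by
    rw [hitems, List.map_map]
    exact List.map_congr_left (fun t _ => rfl)
  rw [hdur]

-- ---- B-side normalization ----

-- the new (not yet seen) elements of P relative to s, in first-occurrence order
def pvFresh (s : PySem.Set (String × String)) (P : List (String × String)) :
    List (String × String) :=
  (PySem.Set.ofList P).filter (fun p => !(PySem.Set.contains s p))

lemma filter_discard {α : Type} [BEq α] [LawfulBEq α] (q : α → Bool) (x : α) (hx : q x = false)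
    (l : List α) : (l.filter (fun y => !(y == x))).filter q = l.filter q := by
  rw [List.filter_filter]
  apply List.filter_congr
  intro y _
  by_cases hy : y = x
  · subst hy; simp [hx]
  · simp [hy]

lemma fresh_cons_mem (s : PySem.Set (String × String)) (p : String × String)
    (t : List (String × String)) (h : PySem.Set.contains s p = true) :
    pvFresh s (p :: t) = pvFresh s t := by
  have hps : p ∈ s := (PySem.Set.contains_iff s p).1 h
  unfold pvFresh
  rw [PySem.Set.ofList_cons]
  have hdis : (PySem.Set.ofList t).discard p
      = (PySem.Set.ofList t).filter (fun y => !(y == p)) := rfl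
  rw [List.filter_cons, hdis, filter_discard _ p (by simp [hps])]
  simp [hps]

lemma fresh_cons_not_mem (s : PySem.Set (String × String)) (p : String × String)
    (t : List (String × String)) (h : PySem.Set.contains s p = false) :
    pvFresh s (p :: t) = p :: pvFresh (PySem.Set.add s p) t := by
  unfold pvFresh
  rw [PySem.Set.ofList_cons]
  have hpns : p ∉ s := by
    intro hm
    rw [(PySem.Set.contains_iff s p).2 hm] at h
    exact Bool.true_eq_false.mp h
  have hadd : PySem.Set.add s p = s ++ [p] := PySem.Set.add_of_not_mem hpns
  have hdis : (PySem.Set.ofList t).discard p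
      = (PySem.Set.ofList t).filter (fun y => !(y == p)) := rfl
  rw [List.filter_cons, hdis]
  have hcontadd : ∀ y : String × String, PySem.Set.contains (PySem.Set.add s p) y
      = (PySem.Set.contains s y || (y == p)) := by
    intro y
    rw [hadd]
    by_cases hyp : y = p
    · subst hyp
      simp
    · have hb : (y == p) = false := by simpa using hyp
      have h1 : PySem.Set.contains (s ++ [p]) y = PySem.Set.contains s y := by
        cases hc : PySem.Set.contains s y with
        | true =>
          rw [PySem.Set.contains_iff]
          exact List.mem_append_left _ ((PySem.Set.contains_iff s y).1 hc)
        | false =>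
          rw [← Bool.not_eq_true, PySem.Set.contains_iff]
          intro hmem
          rcases List.mem_append.1 hmem with h2 | h2
          · rw [(PySem.Set.contains_iff s y).2 h2] at hc; exact Bool.true_eq_false.mp hc
          · exact hyp (by simpa using h2)
      rw [h1, hb]
      simp
  have hff : (PySem.Set.ofList t).filter (fun y => !(PySem.Set.contains (PySem.Set.add s p) y))
      = ((PySem.Set.ofList t).filter (fun y => !(y == p))).filter
          (fun y => !(PySem.Set.contains s y)) := by
    rw [List.filter_filter]
    apply List.filter_congr
    intro y _
    rw [hcontadd y]
    cases hc : PySem.Set.contains s y <;> cases hp : (y == p) <;> simp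
  rw [hff]
  simp [hpns]

lemma seen_loop (P : List (String × String)) (s : PySem.Set (String × String))
    (c : PySem.Dict String Int) :
    P.foldl (fun sc p =>
        if PySem.Set.contains sc.1 p then sc
        else (PySem.Set.add sc.1 p, sc.2.modify p.1 0 (fun x => x + 1))) (s, c)
      = (PySem.Set.update s P,
         (pvFresh s P).foldl (fun d p => d.modify p.1 0 (fun x => x + 1)) c) := by
  induction P generalizing s c with
  | nil => simp [pvFresh, PySem.Set.ofList_nil, PySem.Set.update_nil]
  | cons p t ih =>
    rw [List.foldl_cons]
    cases hc : PySem.Set.contains s p with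
    | true =>
      simp only [if_true]
      rw [ih, fresh_cons_mem s p t hc, PySem.Set.update_cons,
        PySem.Set.add_of_mem ((PySem.Set.contains_iff s p).1 hc)]
    | false =>
      simp only [Bool.false_eq_true, if_false]
      rw [ih, fresh_cons_not_mem s p t hc, PySem.Set.update_cons, List.foldl_cons]

lemma fresh_empty (P : List (String × String)) : pvFresh PySem.Set.empty P = PySem.Set.ofList P := by
  unfold pvFresh
  have : ∀ p ∈ PySem.Set.ofList P, (!(PySem.Set.contains PySem.Set.empty p)) = true := by
    intro p _; rfl
  exact List.filter_eq_self.2 this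

-- number of distinct dates of title t = number of deduplicated pairs whose first component is t
lemma dedup_filter_map (t : String) (P : List (String × String)) :
    ((PySem.Set.ofList P).filter (fun p => p.1 == t)).map Prod.snd
      = PySem.Set.ofList ((P.filter (fun p => p.1 == t)).map Prod.snd) := by
  induction P using List.reverseRecOn with
  | nil => rfl
  | append_singleton P p ih =>
    rw [PySem.Set.ofList_append_singleton, List.filter_append, List.map_append,
      PySem.Set.add_eq_ite]
    by_cases hpt : p.1 = t
    · have hb : (p.1 == t) = true := by simpa using hpt
      have h5 : (List.filter (fun q => q.1 == t) [p]).map Prod.snd = [p.2] := by simp [hb]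
      rw [h5, PySem.Set.ofList_append_singleton]
      by_cases hmem : p ∈ PySem.Set.ofList P
      · have hP : p ∈ P := (PySem.Set.mem_ofList _ _).1 hmem
        have h2 : p.2 ∈ (P.filter (fun q => q.1 == t)).map Prod.snd :=
          List.mem_map.2 ⟨p, List.mem_filter.2 ⟨hP, hb⟩, rfl⟩
        rw [if_pos hmem, ih,
          PySem.Set.add_of_mem ((PySem.Set.mem_ofList _ _).2 h2)]
      · have hP : p ∉ P := fun h => hmem ((PySem.Set.mem_ofList _ _).2 h)
        have h2 : p.2 ∉ (P.filter (fun q => q.1 == t)).map Prod.snd := by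
          intro h
          obtain ⟨q, hq, hq2⟩ := List.mem_map.1 h
          obtain ⟨hqP, hqb⟩ := List.mem_filter.1 hq
          have hqp : q = p := by
            have h1 : q.1 = t := by simpa using hqb
            have hqeta : q = (q.1, q.2) := rfl
            rw [hqeta, h1, hq2, ← hpt]
          exact hP (hqp ▸ hqP)
        rw [if_neg hmem, List.filter_append, List.map_append, h5, ih,
          PySem.Set.add_of_not_mem ((fun h => h2 ((PySem.Set.mem_ofList _ _).1 h)))]
    · have hb : (p.1 == t) = false := by simpa using hpt
      have h5 : (List.filter (fun q => q.1 == t) [p]).map Prod.snd = [] := by simp [hb]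
      rw [h5, List.append_nil]
      by_cases hmem : p ∈ PySem.Set.ofList P
      · rw [if_pos hmem, ih]
      · rw [if_neg hmem, List.filter_append, List.map_append, h5, List.append_nil, ih]

lemma count_eq_len (t : String) (P : List (String × String)) :
    (((PySem.Set.ofList P).map Prod.fst).count t : Int)
      = PySem.Set.len (PySem.Set.ofList ((P.filter (fun p => p.1 == t)).map Prod.snd)) := by
  rw [← dedup_filter_map t P]
  have h1 : ((PySem.Set.ofList P).map Prod.fst).count t
      = ((PySem.Set.ofList P).filter (fun p => p.1 == t)).length := by
    rw [List.count_eq_countP, List.countP_map, ← List.countP_eq_length_filter]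
    rfl
  have h2 : PySem.Set.len (((PySem.Set.ofList P).filter (fun p => p.1 == t)).map Prod.snd)
      = ((((PySem.Set.ofList P).filter (fun p => p.1 == t)).map Prod.snd).length : Int) := rfl
  rw [h2, List.length_map, h1]

lemma B_norm (catalog : List (List (String × String))) (country : List String) :
    segundo_requerimiento_alt catalog country =
      ((pvPaises catalog country).getD
        ((pvDur catalog country).foldl scanF (0, -1, 0)).1 [],
       ((pvDur catalog country).foldl scanF (0, -1, 0)).2.1) := by
  simp only [segundo_requerimiento_alt]
  -- the fused pass
  have fused : ∀ (cat : List (List (String × String)))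
      (acc : List (List (String × String)) × List String × List String),
      cat.foldl (fun st i =>
        let d := PySem.Dict.ofList i
        if (match d.get? "country" with | some v => country.contains v | none => false) then
          (st.1 ++ [d.items],
           (match d.get? "title" with | some t => st.2.1 ++ [t] | none => st.2.1),
           (match d.get? "trending_date" with | some dt => st.2.2 ++ [dt] | none => st.2.2))
        else st) acc
      = (acc.1 ++ pvPaises cat country, acc.2.1 ++ pvN cat country, acc.2.2 ++ pvD cat country) := by
    intro cat
    induction cat with
    | nil => intro acc; simp [pvPaises, pvN, pvD, pvF]
    | cons i t ih =>
      intro acc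
      rw [List.foldl_cons]
      have hcond : (match (PySem.Dict.ofList i).get? "country" with
          | some v => country.contains v | none => false) = pvCond country (pvItemsA i) := by
        rw [get?_eq_find?]
        unfold pvCond pvItemsA
        cases (PySem.Dict.ofList i).items.find? (fun kv => kv.1 == "country") <;> rfl
      have hopt : ∀ (k0 : String) (l : List String),
          (match (PySem.Dict.ofList i).get? k0 with | some v => l ++ [v] | none => l)
            = l ++ pvOpt k0 (pvItemsA i) := by
        intro k0 l
        rw [pvOpt_get?]
        cases (PySem.Dict.ofList i).get? k0 <;> simp
      cases hc : pvCond country (pvItemsA i) with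
      | true =>
        simp only [hcond, hc, if_true, hopt]
        rw [ih]
        simp only [pvPaises, pvN, pvD, pvF, List.filter_cons, hc, if_true,
          List.map_cons, List.flatMap_cons]
        refine Prod.ext ?_ (Prod.ext ?_ ?_) <;> simp [pvItemsA]
      | false =>
        simp only [hcond, hc, Bool.false_eq_true, if_false]
        rw [ih]
        simp [pvPaises, pvN, pvD, pvF, hc]
  rw [fused]
  simp only [List.nil_append]
  rw [show (pvN catalog country).zip (pvD catalog country) = pvPairs catalog country from rfl]
  -- the counter dict
  set cnt0 : PySem.Dict String Int :=
    (pvN catalog country).foldl (fun d t => d.insert t 0) PySem.Dict.empty with hcnt0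
  rw [seen_loop (pvPairs catalog country) PySem.Set.empty cnt0,
    fresh_empty (pvPairs catalog country)]
  set cnt := (PySem.Set.ofList (pvPairs catalog country)).foldl
    (fun d p => d.modify p.1 0 (fun x => x + 1)) cnt0 with hcnt
  have hkeys0 : cnt0.keys = PySem.Set.ofList (pvN catalog country) := by
    rw [hcnt0, PySem.Dict.keys_foldl_insert (f := fun _ _ => (0 : Int))]
    exact PySem.Set.update_empty _
  have hnd0 : cnt0.keys.Nodup := by
    rw [hcnt0]
    exact PySem.Dict.nodup_keys_foldl_insert _ _ _ (by simp)
  have hkeys : cnt.keys = PySem.Set.ofList (pvN catalog country) := by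
    rw [hcnt, PySem.Dict.keys_foldl_modify_key (PySem.Set.ofList (pvPairs catalog country))
      Prod.fst 0 (fun _ _ v => v + 1) cnt0, hkeys0, set_update_absorb]
    intro x hx
    obtain ⟨p, hp, rfl⟩ := List.mem_map.1 hx
    exact (PySem.Set.mem_ofList _ _).2
      (mem_pairs_fst catalog country ((PySem.Set.mem_ofList _ _).1 hp))
  have hnd : cnt.keys.Nodup := by
    rw [hcnt]
    exact PySem.Dict.nodup_keys_foldl_modify_key _ Prod.fst 0 _ cnt0 hnd0
  have hgetD : ∀ t, cnt.getD t 0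
      = (((PySem.Set.ofList (pvPairs catalog country)).map Prod.fst).count t : Int) := by
    intro t
    have hfm : List.foldl (fun (d : PySem.Dict String Int) (x : String) =>
          d.modify x 0 (fun v => v + 1)) cnt0
          ((PySem.Set.ofList (pvPairs catalog country)).map Prod.fst)
        = List.foldl (fun d p => d.modify p.1 0 (fun v => v + 1)) cnt0
          (PySem.Set.ofList (pvPairs catalog country)) := List.foldl_map
    rw [hcnt, ← hfm, PySem.Dict.getD_foldl_modify_add_one, hcnt0,
      getD_foldl_insert_const _ _ _ _ (by simp [PySem.Dict.getD_empty])]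
    simp
  have hvalues : cnt.values = pvDur catalog country := by
    have hv : cnt.values = cnt.items.map Prod.snd := rfl
    rw [hv, items_eq_map_keys cnt (0 : Int) hnd, hkeys, List.map_map]
    apply List.map_congr_left
    intro t _
    simp only [Function.comp]
    rw [hgetD t, count_eq_len t (pvPairs catalog country)]
    rfl
  rw [hvalues]
  rfl

-- ---- the argmax scan computes (first index of the maximum, the maximum) ----

lemma scan_stay (t : List Int) (bi i : Nat) (bc : Int) (h : ∀ x ∈ t, ¬ bc < x) :
    t.foldl scanF (bi, bc, i) = (bi, bc, i + t.length) := by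
  induction t generalizing i with
  | nil => simp
  | cons c r ih =>
    rw [List.foldl_cons]
    have : scanF (bi, bc, i) c = (bi, bc, i + 1) := by
      simp [scanF, h c (by simp)]
    rw [this, ih _ (fun x hx => h x (by simp [hx]))]
    simp; omega

lemma scan_go (L : List Int) (m : Int) (hm : m ∈ L) (hmax : ∀ x ∈ L, x ≤ m) :
    ∀ (bi i : Nat) (bc : Int), bc < m →
      L.foldl scanF (bi, bc, i)
        = (i + (PySem.List.index? L m).getD 0, m, i + L.length) := by
  induction L with
  | nil => cases hm
  | cons c t ih =>
    intro bi i bc hbc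
    by_cases hcm : c = m
    · subst hcm
      rw [PySem.List.index?_cons_self]
      have hstep : scanF (bi, bc, i) c = (i, c, i + 1) := by simp [scanF, hbc]
      rw [List.foldl_cons, hstep, scan_stay t i (i + 1) c (fun x hx => by
        have := hmax x (by simp [hx]); omega)]
      simp; omega
    · have hmt : m ∈ t := by cases hm with
        | head => exact absurd rfl hcm
        | tail _ h => exact h
      obtain ⟨j, hj⟩ := Option.isSome_iff_exists.1 ((PySem.List.index?_isSome_iff t m).2 hmt)
      have hidx : PySem.List.index? (c :: t) m = some (j + 1) := by
        rw [PySem.List.index?_cons_of_ne t (by simpa using hcm), hj]; rfl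
      have hmax' : ∀ x ∈ t, x ≤ m := fun x hx => hmax x (by simp [hx])
      rw [List.foldl_cons, hidx]
      by_cases hbcc : bc < c
      · have hstep : scanF (bi, bc, i) c = (i, c, i + 1) := by simp [scanF, hbcc]
        have hcltm : c < m := lt_of_le_of_ne (hmax c (by simp)) hcm
        rw [hstep, ih hmt hmax' i (i + 1) c hcltm, hj]
        simp; omega
      · have hstep : scanF (bi, bc, i) c = (bi, bc, i + 1) := by simp [scanF, hbcc]
        rw [hstep, ih hmt hmax' bi (i + 1) bc hbc, hj]
        simp; omega

-- ---- final assembly ----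

lemma dur_nonneg (catalog : List (List (String × String))) (country : List String) :
    ∀ x ∈ pvDur catalog country, 0 ≤ x := by
  intro x hx
  obtain ⟨t, _, rfl⟩ := List.mem_map.1 hx
  have : PySem.Set.len (PySem.Set.ofList (pvVals catalog country t))
      = ((PySem.Set.ofList (pvVals catalog country t)).length : Int) := rfl
  rw [this]
  exact Int.natCast_nonneg _

lemma pre_dur_ne_nil (catalog : List (List (String × String))) (country : List String)
    (hpre : Pre_segundo_requerimiento catalog country) : pvDur catalog country ≠ [] := by
  obtain ⟨i, hi, ⟨c, hc, hcv⟩, hti⟩ := hpre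
  have hcond : pvCond country (pvItemsA i) = true := by
    unfold pvCond pvItemsA
    rw [get?_eq_find?] at hcv
    cases hfind : (PySem.Dict.ofList i).items.find? (fun kv => kv.1 == "country") with
    | none => rw [hfind] at hcv; simp at hcv
    | some kv =>
      rw [hfind] at hcv
      simp only [Option.map_some, Option.some.injEq] at hcv
      simpa [hcv] using hc
  obtain ⟨tt, htt⟩ := Option.isSome_iff_exists.1 hti
  have hNmem : tt ∈ pvN catalog country := by
    apply List.mem_flatMap.2
    refine ⟨i, List.mem_filter.2 ⟨hi, hcond⟩, ?_⟩
    rw [pvOpt_get?, htt]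
    simp
  intro hnil
  unfold pvDur at hnil
  rw [List.map_eq_nil_iff] at hnil
  have hmem2 : tt ∈ PySem.Set.ofList (pvN catalog country) := (PySem.Set.mem_ofList _ _).2 hNmem
  rw [hnil] at hmem2
  exact List.not_mem_nil hmem2

lemma ports_eq (catalog : List (List (String × String))) (country : List String)
    (hpre : Pre_segundo_requerimiento catalog country) :
    segundo_requerimiento catalog country = segundo_requerimiento_alt catalog country := by
  rw [A_norm, B_norm]
  cases hmax : PySem.List.max? (pvDur catalog country) (fun x => x) with
  | none =>
    exact absurd ((PySem.List.max?_eq_none_iff _ _).1 hmax) (pre_dur_ne_nil catalog country hpre)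
  | some m =>
    have hm : m ∈ pvDur catalog country := PySem.List.max?_mem hmax
    have hmaxle : ∀ x ∈ pvDur catalog country, x ≤ m := PySem.List.max?_isMax hmax
    have hbc : (-1 : Int) < m := lt_of_lt_of_le (by norm_num) (dur_nonneg catalog country m hm)
    rw [scan_go (pvDur catalog country) m hm hmaxle 0 0 (-1) hbc]
    simp

-- ===== VERDICT (by name: the statement is the Claim_ definition above) =====
theorem segundo_requerimiento_spec : Claim_equal_segundo_requerimiento := by
  intro catalog country _ hpre
  unfold Spec_segundo_requerimiento
  exact ports_eq catalog country hpre
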